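-- pv_equiv track=rewrite | github.com/zoi5161/Gem-Hunter | Run.py | solveBackTrack
-- ===== SOURCE A (Python) =====
-- import copy
--
-- def get_neighbors(grid, row, col): # Get neighbor cells
--     neighbors = []
--     rows, cols = len(grid), len(grid[0])
--
--     for dx, dy in [(-1,-1), (-1,0), (-1,1), (0,-1), (0,1), (1,-1), (1,0), (1,1)]:
--         new_row, new_col = row + dx, col + dy
--         if 0 <= new_row < rows and 0 <= new_col < cols:
--             neighbors.append((new_row, new_col))
--
--     return neighbors
--
-- def is_valid(grid, solveBoard): # Check if the solveBoard sastisfies the requirrment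
--     rows, cols = len(grid), len(grid[0])
--
--     for row in range(rows):
--         for col in range(cols):
--             if grid[row][col].isnumeric():  # If current cell is a number
--                 trap_count = 0
--                 for neighbor_row, neighbor_col in get_neighbors(grid, row, col):
--                     if isinstance(solveBoard[neighbor_row][neighbor_col], bool) and solveBoard[neighbor_row][neighbor_col] == True:  # If neighbor cell is True (Trap)
--                         trap_count += 1 # Increase Trap count
--                 if trap_count != int(grid[row][col]):   # If trap count does not equal the current cell's value
--                     return False
--
--     return True
--
-- def backtrack(grid, solveBoard, row=0, col=0): # Use recursion for backtracking
--     rows, cols = len(grid), len(grid[0])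
--
--     if row == rows - 1 and col == cols: # If current cell is the final cell
--         return is_valid(grid, solveBoard)   # Check if the solveBoard sasstisfies the requirement
--
--     if col == cols: # If the current cell is the last cell of the row
--         return backtrack(grid, solveBoard, row + 1, 0)  # Continue recursion with the next row
--
--     # Try assigning True (trap) and False (gem) to the current cell
--     if isinstance(solveBoard[row][col], bool) or solveBoard[row][col] == '_':   # If the current cell has Boolean value of '_'
--         solveBoard[row][col] = True # Set the current cell to True
--
--     if backtrack(grid, solveBoard, row, col + 1):   # Continue recursion with the next cell
--         return True
--
--     if isinstance(solveBoard[row][col], bool) or solveBoard[row][col] == '_': # Vice versa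
--         solveBoard[row][col] = False
--
--     if backtrack(grid, solveBoard, row, col + 1):
--         return True
--
--     return False
--
-- def solveBackTrack(grid): # Solve the fird
--     rows, cols = len(grid), len(grid[0])
--     solveBoard = copy.deepcopy(grid)
--
--     if backtrack(grid, solveBoard): # If the grid is solvable
--         for row in range(rows):
--             for col in range(cols):
--                 if grid[row][col] == "_":   # Set 'T' and 'G' to corresponding cells
--                     grid[row][col] = "T" if solveBoard[row][col] == True else "G"
--         return grid
--
--     else:
--         return None
-- ===== SOURCE B (Python) =====
-- def solveBackTrack(grid):
--     # B: backtracking over the blank cells only, with incremental constraint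
--     # checking: each numeric constraint is verified as soon as its last blank
--     # neighbour is assigned, pruning the search instead of testing at leaves.
--     # Unlike A, B does not mutate `grid` (equivalence is about the return value).
--     rows, cols = len(grid), len(grid[0])
--
--     blanks = [(r, c) for r in range(rows) for c in range(cols) if grid[r][c] == '_']
--     index = {p: i for i, p in enumerate(blanks)}
--     n = len(blanks)
--
--     # Constraints: (target, indices of blank neighbours), grouped by the index
--     # at which they become fully decided; constraints with no blank neighbour
--     # must already hold (only blanks can ever be traps).
--     pending = [[] for _ in range(n)]
--     for r in range(rows):
--         for c in range(cols):
--             if grid[r][c].isnumeric():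
--                 nb = [index[(r + dr, c + dc)]
--                       for dr in (-1, 0, 1) for dc in (-1, 0, 1)
--                       if (dr, dc) != (0, 0) and (r + dr, c + dc) in index]
--                 target = int(grid[r][c])
--                 if nb:
--                     pending[max(nb)].append((target, nb))
--                 elif target != 0:
--                     return None
--
--     def search(i, vals):
--         if i == n:
--             return vals
--         for v in (True, False):
--             vals.append(v)
--             if all(sum(vals[j] for j in nb) == t for (t, nb) in pending[i]):
--                 r = search(i + 1, vals)
--                 if r is not None:
--                     return r
--             vals.pop()
--         return None
--
--     vals = search(0, [])
--     if vals is None: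
--         return None
--     out = [row[:] for row in grid]
--     for (r, c), v in zip(blanks, vals):
--         out[r][c] = 'T' if v else 'G'
--     return out
-- ===== Notes on version B (the rewrite author's own statement) =====
-- stated objective: faster
-- what changed: B backtracks over the blank cells only with incremental constraint checking (each numeric constraint is verified as soon as its last blank neighbour is assigned, pruning failed branches early), instead of A's exhaustive recursion over every cell that branches twice even on fixed cells and validates complete boards only at the leaves; B does not mutate grid.
import Mathlib
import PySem

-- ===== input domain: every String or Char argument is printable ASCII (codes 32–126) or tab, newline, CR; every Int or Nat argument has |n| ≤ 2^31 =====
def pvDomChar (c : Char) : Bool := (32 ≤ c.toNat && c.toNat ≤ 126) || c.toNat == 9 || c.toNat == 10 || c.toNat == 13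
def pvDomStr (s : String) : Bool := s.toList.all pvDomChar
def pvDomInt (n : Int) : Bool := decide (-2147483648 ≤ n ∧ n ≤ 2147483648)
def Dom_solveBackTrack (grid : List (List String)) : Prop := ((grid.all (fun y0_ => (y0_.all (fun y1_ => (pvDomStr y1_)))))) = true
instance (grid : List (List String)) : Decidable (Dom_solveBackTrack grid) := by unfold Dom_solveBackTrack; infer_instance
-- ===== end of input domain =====

-- B replaces A's leaf-checked exhaustive backtracking (which also branches twice on every
-- non-blank cell) by backtracking over the blank cells only with incremental constraint
-- checking (each numeric constraint is verified as soon as its last blank neighbour is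
-- assigned), keeping A's True-before-False order; equivalence is about the RETURN value
-- only: Python A mutates `grid` in place on success, B does not.

-- ===== PORT A =====

/-- A board cell: still the original string, or a bool written by the backtracker. -/
inductive Cell where
  | s (v : String)
  | b (v : Bool)
deriving DecidableEq, Repr

-- board[r][c] / grid[r][c]; every Python access is with in-range non-negative indices
-- (range() counters and bound-checked neighbours), where getD is exact.
def cellGet (bd : List (List Cell)) (r c : Nat) : Cell := (bd.getD r []).getD c (Cell.s "")

def strGet (gd : List (List String)) (r c : Nat) : String := (gd.getD r []).getD c ""

-- board[r][c] = v (in-range assignment, where List.set is exact)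
def cellSet (bd : List (List Cell)) (r c : Nat) (v : Cell) : List (List Cell) :=
  bd.set r ((bd.getD r []).set c v)

def strSet (gd : List (List String)) (r c : Nat) (v : String) : List (List String) :=
  gd.set r ((gd.getD r []).set c v)

/-- Port of `get_neighbors`. -/
def getNeighbors (gd : List (List String)) (row col : Int) : List (Int × Int) :=
  let rows : Int := gd.length
  let cols : Int := (gd.headD []).length   -- len(grid[0]); grid ≠ [] under Pre_
  ([(-1,-1),(-1,0),(-1,1),(0,-1),(0,1),(1,-1),(1,0),(1,1)] : List (Int × Int)).foldl
    (fun acc d =>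
      let nr := row + d.1
      let nc := col + d.2
      if 0 ≤ nr ∧ nr < rows ∧ 0 ≤ nc ∧ nc < cols then acc ++ [(nr, nc)] else acc) []

/-- `isinstance(x, bool) and x == True`. -/
def isTrap (c : Cell) : Bool := match c with | .b v => v | .s _ => false

/-- Port of `is_valid` (nested loops with early `return False` = `all`).
`isnumeric` = `strIsdigit` on the printable-ASCII domain, where `int()` then parses. -/
def isValidA (gd : List (List String)) (bd : List (List Cell)) : Bool :=
  (List.range gd.length).all fun row =>
    (List.range (gd.headD []).length).all fun col =>
      if PySem.Str.strIsdigit (strGet gd row col) then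
        ((getNeighbors gd row col).foldl
          (fun a p => if isTrap (cellGet bd p.1.toNat p.2.toNat) then a + 1 else a) (0 : Int))
          == (PySem.Int.ofStr? (strGet gd row col)).getD 0
      else true

/-- `isinstance(x, bool) or x == '_'`. -/
def isBoolOrBlank (c : Cell) : Bool := match c with | .b _ => true | .s v => v == "_"

/-- Port of `backtrack`; the board is threaded as state (Python mutates it).
The fuel argument only makes the recursion total: the initial fuel below always suffices. -/
def backtrackA (gd : List (List String)) :
    Nat → List (List Cell) → Nat → Nat → Bool × List (List Cell)
  | 0, bd, _, _ => (false, bd)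
  | fuel+1, bd, row, col =>
    let rows := gd.length
    let cols := (gd.headD []).length
    if row = rows - 1 ∧ col = cols then (isValidA gd bd, bd)
    else if col = cols then backtrackA gd fuel bd (row+1) 0
    else
      let bd1 := if isBoolOrBlank (cellGet bd row col) then cellSet bd row col (.b true) else bd
      match backtrackA gd fuel bd1 row (col+1) with
      | (true, bd') => (true, bd')
      | (false, bd') =>
        let bd2 := if isBoolOrBlank (cellGet bd' row col) then cellSet bd' row col (.b false)
                   else bd'
        backtrackA gd fuel bd2 row (col+1)

/-- Port of `solveBackTrack` (A). The final nested render loops mutate `grid`;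
ported as a fold over the same index ranges. -/
def solveBackTrack (grid : List (List String)) : Option (List (List String)) :=
  let rows := grid.length
  let cols := (grid.headD []).length
  let board0 := grid.map (fun row => row.map Cell.s)   -- copy.deepcopy(grid)
  match backtrackA grid (rows * (cols + 1) + 1) board0 0 0 with
  | (true, sb) =>
      some ((List.range rows).foldl (fun g row =>
        (List.range cols).foldl (fun g col =>
          if strGet g row col = "_" then
            strSet g row col (if cellGet sb row col = .b true then "T" else "G")
          else g) g) grid)
  | (false, _) => none

-- ===== PORT B =====

/-- `blanks = [(r, c) for r in range(rows) for c in range(cols) if grid[r][c] == '_']`. -/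
def blanksOf (gd : List (List String)) : List (Nat × Nat) :=
  (List.range gd.length).flatMap fun r =>
    (List.range (gd.headD []).length).filterMap fun c =>
      if strGet gd r c = "_" then some (r, c) else none

/-- `index = {p: i for i, p in enumerate(blanks)}` (keys as Python int pairs). -/
def indexOf (gd : List (List String)) : PySem.Dict (Int × Int) Int :=
  (PySem.List.enumerate (blanksOf gd)).foldl
    (fun d ip => d.insert ((ip.2.1 : Int), (ip.2.2 : Int)) ip.1) PySem.Dict.empty

/-- `[index[(r+dr, c+dc)] for dr ... for dc ... if (dr,dc) != (0,0) and (r+dr,c+dc) in index]`: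
the membership test followed by the lookup is exactly `Dict.get?`. -/
def nbOf (gd : List (List String)) (r c : Nat) : List Int :=
  ([-1, 0, 1] : List Int).flatMap fun dr =>
    ([-1, 0, 1] : List Int).filterMap fun dc =>
      if (dr, dc) ≠ ((0 : Int), (0 : Int)) then
        (indexOf gd).get? ((r : Int) + dr, (c : Int) + dc)
      else none

/-- The constraint-building loop: buckets constraints by the blank index at which they are
fully decided (`pending[max(nb)].append(...)`; `max` of the nonempty `nb`, a non-negative
index, so `.getD 0 |>.toNat` is exact); `none` = the early `return None`. -/
def pendingOf (gd : List (List String)) : Option (List (List (Int × List Int))) :=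
  (List.range gd.length).foldl (fun acc r =>
    (List.range (gd.headD []).length).foldl (fun acc c =>
      match acc with
      | none => none
      | some pend =>
        if PySem.Str.strIsdigit (strGet gd r c) then
          let nb := nbOf gd r c
          let target : Int := (PySem.Int.ofStr? (strGet gd r c)).getD 0
          if nb ≠ [] then
            some (pend.modify (((PySem.List.max? nb (fun x => x)).getD 0).toNat)
                    (fun l => l ++ [(target, nb)]))
          else if target ≠ 0 then none
          else some pend
        else some pend) acc)
    (some (List.replicate (blanksOf gd).length ([] : List (Int × List Int))))

/-- `search(i, vals)`: structural recursion on the remaining buckets; the `for v in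
(True, False)` loop is unrolled; `vals[j]` is an in-range access (`j ≤` the bucket index),
where `pyGet? |>.getD` is exact. -/
def searchB : List (List (Int × List Int)) → List Bool → Option (List Bool)
  | [], vals => some vals
  | pk :: rest, vals =>
    let tryv := fun (v : Bool) =>
      let vals' := vals ++ [v]
      if pk.all (fun con =>
          (con.2.foldl (fun a j =>
            a + (if (PySem.List.pyGet? vals' j).getD false then (1 : Int) else 0)) 0) == con.1)
      then searchB rest vals' else none
    match tryv true with
    | some v => some v
    | none => tryv false

/-- Port of my implementation B (see Source B). -/
def solveBackTrack_alt (grid : List (List String)) : Option (List (List String)) :=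
  match pendingOf grid with
  | none => none
  | some pending =>
    match searchB pending [] with
    | none => none
    | some vals =>
      some ((((blanksOf grid).zip vals)).foldl
        (fun out pv => strSet out pv.1.1 pv.1.2 (if pv.2 then "T" else "G"))
        (grid.map (fun row => row)))   -- out = [row[:] for row in grid]

-- ===== PRECONDITION & SPEC =====

-- Pre_ excludes exactly the inputs where Python A raises IndexError: the empty grid
-- (len(grid[0])), and grids with a row shorter than the first row (cell access in backtrack).
def Pre_solveBackTrack (grid : List (List String)) : Prop :=
  grid ≠ [] ∧ ∀ row ∈ grid, (grid.headD []).length ≤ row.length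

instance (grid : List (List String)) : Decidable (Pre_solveBackTrack grid) := by
  unfold Pre_solveBackTrack; infer_instance

def pvWitness_solveBackTrack : List (List String) := [["1", "_"], ["_", "0"]]

def Spec_solveBackTrack (grid : List (List String)) (out : Option (List (List String))) : Prop :=
  out = solveBackTrack_alt grid

instance (grid : List (List String)) (out : Option (List (List String))) :
    Decidable (Spec_solveBackTrack grid out) := by unfold Spec_solveBackTrack; infer_instance

-- ===== CLAIM (what is proved, stated in full; the proofs are below) =====
def Claim_equal_solveBackTrack : Prop := ∀ (grid : List (List String)),
  Dom_solveBackTrack grid → Pre_solveBackTrack grid →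
  Spec_solveBackTrack grid (solveBackTrack grid)

-- ===== LEMMAS AND PROOFS =====


-- Shorthands for the grid dimensions (identical to the ports' inline expressions).
def colsOf (gd : List (List String)) : Nat := (gd.headD []).length

/-- Row-major (lexicographic) order on cell positions. -/
abbrev pltP (p q : Nat × Nat) : Prop := p.1 < q.1 ∨ (p.1 = q.1 ∧ p.2 < q.2)

/-- `p` is a blank ('_') cell of the grid, inside the scanned `rows × cols` rectangle. -/
abbrev blankP (gd : List (List String)) (p : Nat × Nat) : Prop :=
  p.1 < gd.length ∧ p.2 < colsOf gd ∧ strGet gd p.1 p.2 = "_"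

/-- Index of a blank position in `blanksOf gd`. -/
def posIdx (gd : List (List String)) (p : Nat × Nat) : Nat := (blanksOf gd).idxOf p

/-- The board whose cell `(r,c)` is `f (r,c)` at blanks (inside the rectangle) and the
original string elsewhere; every board A's backtracker touches has this form. -/
def Wb (gd : List (List String)) (f : Nat × Nat → Cell) : List (List Cell) :=
  (List.range gd.length).map fun r =>
    (List.range (gd.getD r []).length).map fun c =>
      if c < colsOf gd ∧ strGet gd r c = "_" then f (r, c) else Cell.s (strGet gd r c)

/-- The board a full assignment `v` (one Bool per blank, in `blanksOf` order) induces. -/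
def fAssign (gd : List (List String)) (v : List Bool) : Nat × Nat → Cell :=
  fun p => Cell.b (v.getD (posIdx gd p) false)

/-- Reference search: plain first-fit enumeration, `true` before `false`, validity at the
leaves; both ports are reduced to it. -/
def refSearch (gd : List (List String)) : Nat → List Bool → Option (List Bool)
  | 0, vals => if isValidA gd (Wb gd (fAssign gd vals)) then some vals else none
  | m+1, vals =>
    match refSearch gd m (vals ++ [true]) with
    | some v => some v
    | none => refSearch gd m (vals ++ [false])

/-- Blanks of row `r` with column in `[c0, c0+len)`. -/
def seg (gd : List (List String)) (r c0 len : Nat) : List (Nat × Nat) :=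
  (List.range' c0 len).filterMap fun c => if strGet gd r c = "_" then some (r, c) else none

def blanksBefore (gd : List (List String)) (r c : Nat) : List (Nat × Nat) :=
  (List.range r).flatMap (fun r' => seg gd r' 0 (colsOf gd)) ++ seg gd r 0 c

def blanksFrom (gd : List (List String)) (r c : Nat) : List (Nat × Nat) :=
  seg gd r c (colsOf gd - c) ++
    (List.range' (r+1) (gd.length - (r+1))).flatMap (fun r' => seg gd r' 0 (colsOf gd))

/-- Sum of assigned values over a neighbour-index list (B's incremental check body). -/
def sumNb (w : List Bool) (nb : List Int) : Int :=
  nb.foldl (fun a j => a + (if (PySem.List.pyGet? w j).getD false then (1 : Int) else 0)) 0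

def targetOf (gd : List (List String)) (r c : Nat) : Int :=
  (PySem.Int.ofStr? (strGet gd r c)).getD 0

abbrev numericP (gd : List (List String)) (r c : Nat) : Prop :=
  PySem.Str.strIsdigit (strGet gd r c) = true

-- ===== basic facts about blanks lists =====

lemma mem_seg {gd r c0 len p} :
    p ∈ seg gd r c0 len ↔ p.1 = r ∧ c0 ≤ p.2 ∧ p.2 < c0 + len ∧ strGet gd r p.2 = "_" := by
  simp only [seg, List.mem_filterMap, List.mem_range'_1]
  constructor
  · rintro ⟨c, ⟨h1, h2⟩, h⟩
    by_cases hb : strGet gd r c = "_"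
    · rw [if_pos hb] at h
      cases h
      exact ⟨rfl, h1, h2, hb⟩
    · rw [if_neg hb] at h; cases h
  · rintro ⟨h1, h2, h3, h4⟩
    refine ⟨p.2, ⟨h2, h3⟩, ?_⟩
    rw [if_pos h4]
    cases p
    simp_all

lemma blanksOf_eq (gd : List (List String)) :
    blanksOf gd = (List.range gd.length).flatMap (fun r => seg gd r 0 (colsOf gd)) := by
  simp [blanksOf, seg, List.range_eq_range', colsOf]

lemma mem_blanksOf {gd p} : p ∈ blanksOf gd ↔ blankP gd p := by
  rw [blanksOf_eq]
  simp only [List.mem_flatMap, List.mem_range]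
  constructor
  · rintro ⟨r, hr, hp⟩
    obtain ⟨h1, h2, h3, h4⟩ := mem_seg.mp hp
    exact ⟨h1 ▸ hr, by omega, h1 ▸ h4⟩
  · rintro ⟨h1, h2, h3⟩
    exact ⟨p.1, h1, mem_seg.mpr ⟨rfl, Nat.zero_le _, by omega, h3⟩⟩

lemma nodup_seg {gd r c0 len} : (seg gd r c0 len).Nodup := by
  apply List.Nodup.filterMap
  · intro a a' b h h'
    simp only [Option.mem_def] at h h'
    by_cases h1 : strGet gd r a = "_" <;> by_cases h2 : strGet gd r a' = "_" <;>
      simp only [h1, h2, if_true, if_false, reduceCtorEq, Option.some.injEq] at h h'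
    rw [← h'] at h
    exact (Prod.ext_iff.mp h).2
  · exact List.nodup_range'

lemma nodup_blanksOf (gd : List (List String)) : (blanksOf gd).Nodup := by
  rw [blanksOf_eq, List.nodup_flatMap]
  refine ⟨fun _ _ => nodup_seg, ?_⟩
  have : List.Pairwise (· ≠ ·) (List.range gd.length) := List.nodup_range
  apply this.imp
  intro a b hab p hp hp'
  have h1 := (mem_seg.mp hp).1
  have h2 := (mem_seg.mp hp').1
  omega

lemma blanksOf_getElem_posIdx {gd p} (h : p ∈ blanksOf gd) :
    posIdx gd p < (blanksOf gd).length ∧ (blanksOf gd).getD (posIdx gd p) (0,0) = p := by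
  have hlt : (blanksOf gd).idxOf p < (blanksOf gd).length := List.idxOf_lt_length_of_mem h
  refine ⟨hlt, ?_⟩
  show (blanksOf gd).getD ((blanksOf gd).idxOf p) (0,0) = p
  rw [List.getD_eq_getElem _ _ hlt]
  exact List.getElem_idxOf hlt

lemma posIdx_getElem {gd : List (List String)} {k : Nat} (h : k < (blanksOf gd).length) :
    posIdx gd ((blanksOf gd).getD k (0,0)) = k := by
  simp only [posIdx]
  rw [List.getD_eq_getElem _ _ h]
  exact (nodup_blanksOf gd).idxOf_getElem k h

lemma mem_blanksBefore {gd r c p} (hr : r < gd.length) (hc : c ≤ colsOf gd) :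
    p ∈ blanksBefore gd r c ↔ blankP gd p ∧ pltP p (r, c) := by
  simp only [blanksBefore, List.mem_append, List.mem_flatMap, List.mem_range]
  constructor
  · rintro (⟨r', hr', hp⟩ | hp)
    · obtain ⟨h1, _, h3, h4⟩ := mem_seg.mp hp
      exact ⟨⟨by omega, by omega, h1 ▸ h4⟩, Or.inl (by omega)⟩
    · obtain ⟨h1, _, h3, h4⟩ := mem_seg.mp hp
      exact ⟨⟨by omega, by omega, h1 ▸ h4⟩, Or.inr ⟨h1, by omega⟩⟩
  · rintro ⟨⟨h1, h2, h3⟩, hlt⟩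
    rcases hlt with hlt | ⟨he, hlt⟩
    · exact Or.inl ⟨p.1, hlt, mem_seg.mpr ⟨rfl, Nat.zero_le _, by omega, h3⟩⟩
    · refine Or.inr (mem_seg.mpr ⟨he, Nat.zero_le _, by omega, ?_⟩)
      rw [show (r, c).1 = r from rfl] at he
      rw [← he]
      exact h3

-- stepping lemmas
lemma seg_split {gd r} {c0 l1 l2 : Nat} :
    seg gd r c0 (l1 + l2) = seg gd r c0 l1 ++ seg gd r (c0 + l1) l2 := by
  simp only [seg]
  rw [← List.filterMap_append]
  congr 1
  rw [← List.range'_append_1]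

lemma seg_one {gd r c} :
    seg gd r c 1 = if strGet gd r c = "_" then [(r, c)] else [] := by
  simp only [seg, List.range'_one, List.filterMap_cons, List.filterMap_nil]
  split <;> simp_all

lemma blanksFrom_step_col {gd r c} (hc : c < colsOf gd) :
    blanksFrom gd r c = seg gd r c 1 ++ blanksFrom gd r (c+1) := by
  simp only [blanksFrom]
  have h1 : colsOf gd - c = 1 + (colsOf gd - (c+1)) := by omega
  rw [h1, seg_split]
  simp [List.append_assoc]

lemma blanksFrom_step_fixed {gd r c} (hc : c < colsOf gd) (h : strGet gd r c ≠ "_") :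
    blanksFrom gd r c = blanksFrom gd r (c+1) := by
  rw [blanksFrom_step_col hc, seg_one, if_neg h, List.nil_append]

lemma blanksFrom_step_blank {gd r c} (hc : c < colsOf gd) (h : strGet gd r c = "_") :
    blanksFrom gd r c = (r, c) :: blanksFrom gd r (c+1) := by
  rw [blanksFrom_step_col hc, seg_one, if_pos h, List.singleton_append]

lemma blanksBefore_step_col {gd r c} :
    blanksBefore gd r (c+1) = blanksBefore gd r c ++ seg gd r c 1 := by
  simp only [blanksBefore]
  have h1 : c + 1 = c + 1 := rfl
  rw [show seg gd r 0 (c+1) = seg gd r 0 c ++ seg gd r (0+c) 1 from seg_split]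
  simp [List.append_assoc]

lemma blanksBefore_step_fixed {gd r c} (h : strGet gd r c ≠ "_") :
    blanksBefore gd r (c+1) = blanksBefore gd r c := by
  rw [blanksBefore_step_col, seg_one, if_neg h, List.append_nil]

lemma blanksBefore_step_blank {gd r c} (h : strGet gd r c = "_") :
    blanksBefore gd r (c+1) = blanksBefore gd r c ++ [(r, c)] := by
  rw [blanksBefore_step_col, seg_one, if_pos h]

lemma seg_zero {gd r c} : seg gd r c 0 = [] := rfl

lemma blanksFrom_step_row {gd r} (hr : r + 1 < gd.length) :
    blanksFrom gd r (colsOf gd) = blanksFrom gd (r+1) 0 := by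
  simp only [blanksFrom, Nat.sub_self, seg_zero, Nat.sub_zero, List.nil_append]
  have h1 : gd.length - (r+1) = 1 + (gd.length - (r+2)) := by omega
  rw [h1, ← List.range'_append_1, List.flatMap_append]
  simp [List.range'_one]

lemma blanksBefore_step_row {gd r} :
    blanksBefore gd (r+1) 0 = blanksBefore gd r (colsOf gd) := by
  simp only [blanksBefore, List.range_succ, List.flatMap_append, List.flatMap_singleton]
  simp [seg]

lemma blanksFrom_last {gd} : blanksFrom gd (gd.length - 1) (colsOf gd) = [] := by
  simp only [blanksFrom, Nat.sub_self]
  have h1 : gd.length - (gd.length - 1 + 1) = 0 := by omega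
  rw [h1]
  simp [seg]

lemma blanksBefore_last {gd} (h : gd ≠ []) :
    blanksBefore gd (gd.length - 1) (colsOf gd) = blanksOf gd := by
  have hR : 0 < gd.length := List.length_pos_iff.mpr h
  rw [blanksOf_eq]
  simp only [blanksBefore]
  rw [show gd.length = (gd.length - 1) + 1 by omega, List.range_succ, List.flatMap_append]
  simp [show (gd.length - 1 + 1) = gd.length by omega]

lemma blanksFrom_zero {gd} (h : gd ≠ []) : blanksFrom gd 0 0 = blanksOf gd := by
  have hR : 0 < gd.length := List.length_pos_iff.mpr h
  rw [blanksOf_eq]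
  simp only [blanksFrom, Nat.sub_zero]
  rw [show gd.length = 1 + (gd.length - 1) by omega]
  rw [List.range_eq_range', ← List.range'_append_1, List.flatMap_append]
  simp [List.range'_one]

lemma blanksBefore_zero {gd} : blanksBefore gd 0 0 = [] := by
  simp [blanksBefore, seg]

-- ===== boards of the form `Wb gd f` =====

/-- Row lengths Pre_ guarantees. -/
def Shaped (gd : List (List String)) : Prop :=
  ∀ row ∈ gd, colsOf gd ≤ row.length

lemma strGet_eq {gd : List (List String)} {r c : Nat} (hr : r < gd.length)
    (hc : c < gd[r].length) : strGet gd r c = gd[r][c] := by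
  simp only [strGet]
  rw [List.getD_eq_getElem _ _ hr, List.getD_eq_getElem _ _ hc]

lemma Wb_congr {gd f f'} (h : ∀ p, blankP gd p → f p = f' p) : Wb gd f = Wb gd f' := by
  simp only [Wb]
  apply List.map_congr_left
  intro r hr
  apply List.map_congr_left
  intro c hc
  rw [List.mem_range] at hr hc
  by_cases hcond : c < colsOf gd ∧ strGet gd r c = "_"
  · rw [if_pos hcond, if_pos hcond]
    exact h (r, c) ⟨hr, hcond.1, hcond.2⟩
  · rw [if_neg hcond, if_neg hcond]

lemma Wb_length {gd f} : (Wb gd f).length = gd.length := by simp [Wb]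

lemma Wb_getElem {gd f r} (hr : r < gd.length) :
    (Wb gd f)[r]'(by rw [Wb_length]; exact hr) =
      (List.range (gd.getD r []).length).map fun c =>
        if c < colsOf gd ∧ strGet gd r c = "_" then f (r, c) else Cell.s (strGet gd r c) := by
  simp [Wb]

lemma Wb_zero (gd : List (List String)) :
    Wb gd (fun _ => Cell.s "_") = gd.map (fun row => row.map Cell.s) := by
  apply List.ext_getElem
  · simp [Wb]
  intro r h1 h2
  have hrl : r < gd.length := by simpa [Wb_length] using h1
  rw [Wb_getElem hrl]
  simp only [List.getElem_map]
  apply List.ext_getElem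
  · simp [List.getElem?_eq_getElem hrl]
  intro c hc1 hc2
  have hr : r < gd.length := by simpa [Wb_length] using h1
  have hc : c < gd[r].length := by simpa using hc2
  simp only [List.getElem_map, List.getElem_range]
  have hD : gd.getD r [] = gd[r] := List.getD_eq_getElem _ _ hr
  rw [strGet_eq hr hc]
  split
  · next hcond => rw [hcond.2]
  · rfl

lemma cellGet_Wb {gd f r c} (hr : r < gd.length) (hc : c < (gd.getD r []).length) :
    cellGet (Wb gd f) r c =
      if c < colsOf gd ∧ strGet gd r c = "_" then f (r, c) else Cell.s (strGet gd r c) := by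
  simp only [cellGet]
  have h1 : r < (Wb gd f).length := by rw [Wb_length]; exact hr
  rw [List.getD_eq_getElem _ _ h1, Wb_getElem hr]
  have h2 : c < ((List.range (gd.getD r []).length).map fun c =>
      if c < colsOf gd ∧ strGet gd r c = "_" then f (r, c) else Cell.s (strGet gd r c)).length := by
    simpa using hc
  rw [List.getD_eq_getElem _ _ h2]
  simp

lemma cellSet_Wb {gd f r c v} (hb : blankP gd (r, c)) :
    cellSet (Wb gd f) r c v = Wb gd (fun q => if q = (r, c) then v else f q) := by
  obtain ⟨hr, hcC, hblank⟩ := hb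
  simp only [cellSet]
  apply List.ext_getElem
  · simp [Wb_length]
  intro i h1 h2
  have hi : i < gd.length := by simpa [Wb_length] using h2
  have hD : r < (Wb gd f).length := by rw [Wb_length]; exact hr
  by_cases hir : i = r
  · subst hir
    rw [List.getElem_set_self (h := by simpa [List.length_set] using h1)]
    rw [Wb_getElem hi]
    rw [List.getD_eq_getElem _ _ hD, Wb_getElem hi]
    apply List.ext_getElem
    · simp
    intro c' hc1 hc2
    have hc' : c' < (gd.getD i []).length := by simpa using hc2
    by_cases hcc : c' = c
    · subst hcc
      rw [List.getElem_set_self (h := by simpa using hc1)]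
      simp only [List.getElem_map, List.getElem_range]
      rw [if_pos ⟨hcC, hblank⟩]
      simp
    · rw [List.getElem_set_ne (by omega) (hj := by simpa using hc1)]
      simp only [List.getElem_map, List.getElem_range]
      by_cases hcond : c' < colsOf gd ∧ strGet gd i c' = "_"
      · rw [if_pos hcond, if_pos hcond, if_neg (by simp [hcc])]
      · rw [if_neg hcond, if_neg hcond]
  · rw [List.getElem_set_ne (by omega) (hj := by simpa [List.length_set] using h1)]
    rw [Wb_getElem (f := f) hi,
        Wb_getElem (f := fun q => if q = (r, c) then v else f q) hi]
    apply List.map_congr_left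
    intro c' hc'
    rw [List.mem_range] at hc'
    by_cases hcond : c' < colsOf gd ∧ strGet gd i c' = "_"
    · rw [if_pos hcond, if_pos hcond, if_neg (by simp [Prod.ext_iff]; omega)]
    · rw [if_neg hcond, if_neg hcond]

lemma fAssign_read {gd} (f : Nat × Nat → Cell)
    (h : ∀ p, blankP gd p → ∃ v, f p = Cell.b v) :
    Wb gd (fAssign gd ((blanksOf gd).map (fun p => isTrap (f p)))) = Wb gd f := by
  apply Wb_congr
  intro p hp
  obtain ⟨v, hv⟩ := h p hp
  have hmem : p ∈ blanksOf gd := mem_blanksOf.mpr hp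
  obtain ⟨hlt, hget⟩ := blanksOf_getElem_posIdx hmem
  simp only [fAssign]
  have hlen : posIdx gd p < ((blanksOf gd).map (fun p => isTrap (f p))).length := by
    simpa using hlt
  rw [List.getD_eq_getElem _ _ hlen]
  simp only [List.getElem_map]
  rw [List.getD_eq_getElem _ _ hlt] at hget
  rw [hget, hv]
  rfl

-- ===== the index dictionary and neighbour lists =====

lemma enumerate_map_snd {α β : Type} (l : List α) (g : α → β) :
    ∀ s, (PySem.List.enumerate l s).map (fun ip => g ip.2) = l.map g := by
  induction l with
  | nil => intro s; rfl
  | cons x t ih => intro s; simp only [PySem.List.enumerate, List.map_cons]; rw [ih]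

lemma mem_enumerate {α : Type} {l : List α} {ip : Int × α} (d : α) :
    ∀ {s : Int}, ip ∈ PySem.List.enumerate l s ↔
      ∃ k : Nat, k < l.length ∧ ip = (s + k, l.getD k d) := by
  induction l with
  | nil => intro s; simp [PySem.List.enumerate]
  | cons x t ih =>
    intro s
    simp only [PySem.List.enumerate, List.mem_cons, ih]
    constructor
    · rintro (rfl | ⟨k, hk, rfl⟩)
      · exact ⟨0, by simp⟩
      · refine ⟨k+1, by simpa using hk, ?_⟩
        rw [Prod.ext_iff]
        exact ⟨by push_cast; ring, (List.getD_cons_succ ..).symm⟩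
    · rintro ⟨k, hk, rfl⟩
      cases k with
      | zero => left; simp
      | succ k =>
        right
        refine ⟨k, by simpa using hk, ?_⟩
        rw [Prod.ext_iff]
        exact ⟨by push_cast; ring, List.getD_cons_succ ..⟩

def keyOf (p : Nat × Nat) : Int × Int := ((p.1 : Int), (p.2 : Int))

lemma indexOf_items (gd : List (List String)) :
    (indexOf gd).items =
      (PySem.List.enumerate (blanksOf gd)).map (fun ip => (keyOf ip.2, ip.1)) := by
  have h := PySem.Dict.items_foldl_insert_fresh (PySem.List.enumerate (blanksOf gd))
    (fun ip => keyOf ip.2) (fun ip => ip.1) PySem.Dict.empty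
    (by intro a _; exact PySem.Dict.contains_empty _)
    (by
      rw [show (fun ip : Int × (Nat × Nat) => keyOf ip.2) = (fun ip => keyOf ip.2) from rfl,
          enumerate_map_snd]
      exact (nodup_blanksOf gd).map (by
        intro a b hab
        cases a; cases b
        simp only [keyOf, Prod.ext_iff, Int.natCast_inj] at hab ⊢
        exact hab))
  simpa [indexOf, keyOf] using h

lemma indexOf_keys_nodup (gd : List (List String)) : (indexOf gd).keys.Nodup := by
  simp only [indexOf]
  exact PySem.Dict.nodup_keys_foldl_insert_key _ _ _ _ (PySem.Dict.nodup_keys_empty)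

lemma indexOf_get? (gd : List (List String)) (q : Int × Int) :
    (indexOf gd).get? q =
      if _h : 0 ≤ q.1 ∧ 0 ≤ q.2 ∧ (q.1.toNat, q.2.toNat) ∈ blanksOf gd then
        some ((posIdx gd (q.1.toNat, q.2.toNat) : Int))
      else none := by
  have hmemiff : ∀ j : Int, (q, j) ∈ (indexOf gd).items ↔
      ∃ k : Nat, k < (blanksOf gd).length ∧ q = keyOf ((blanksOf gd).getD k (0,0)) ∧ j = k := by
    intro j
    rw [indexOf_items]
    simp only [List.mem_map]
    constructor
    · rintro ⟨ip, hip, hqj⟩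
      obtain ⟨k, hk, rfl⟩ := (mem_enumerate (0,0)).mp hip
      cases hqj
      exact ⟨k, hk, rfl, by simp⟩
    · rintro ⟨k, hk, rfl, rfl⟩
      exact ⟨((k : Int), (blanksOf gd).getD k (0,0)),
        (mem_enumerate (0,0)).mpr ⟨k, hk, by simp⟩, rfl⟩
  split
  · next h =>
    obtain ⟨h1, h2, h3⟩ := h
    apply (PySem.Dict.get?_eq_some_iff_mem_items _ _ _ (indexOf_keys_nodup gd)).mpr
    apply (hmemiff _).mpr
    obtain ⟨hlt, hget⟩ := blanksOf_getElem_posIdx h3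
    refine ⟨posIdx gd (q.1.toNat, q.2.toNat), hlt, ?_, rfl⟩
    rw [hget]
    simp [keyOf, Prod.ext_iff]
    omega
  · next h =>
    cases hg : (indexOf gd).get? q with
    | none => rfl
    | some j =>
      exfalso
      have hm := (PySem.Dict.get?_eq_some_iff_mem_items _ _ _ (indexOf_keys_nodup gd)).mp hg
      obtain ⟨k, hk, hq, _⟩ := (hmemiff j).mp hm
      apply h
      have hmem : (blanksOf gd).getD k (0,0) ∈ blanksOf gd := by
        rw [List.getD_eq_getElem _ _ hk]; exact List.getElem_mem hk
      rw [hq]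
      simp only [keyOf, Int.toNat_natCast]
      exact ⟨Int.natCast_nonneg _, Int.natCast_nonneg _, hmem⟩

lemma nbOf_bounds {gd r c j} (h : j ∈ nbOf gd r c) :
    0 ≤ j ∧ j.toNat < (blanksOf gd).length ∧
    (blanksOf gd).getD j.toNat (0,0) ∈ blanksOf gd ∧
    j = (posIdx gd ((blanksOf gd).getD j.toNat (0,0)) : Int) := by
  simp only [nbOf, List.mem_flatMap, List.mem_filterMap] at h
  obtain ⟨dr, _, dc, _, hj⟩ := h
  by_cases hne : (dr, dc) ≠ ((0:Int), (0:Int))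
  · rw [if_pos hne, indexOf_get?] at hj
    split at hj
    · next hcond =>
      cases hj
      obtain ⟨hlt, hget⟩ := blanksOf_getElem_posIdx hcond.2.2
      refine ⟨Int.natCast_nonneg _, by simpa using hlt, ?_, ?_⟩
      · rw [Int.toNat_natCast, hget]; exact hcond.2.2
      · rw [Int.toNat_natCast, hget]
    · cases hj
  · rw [if_neg hne] at hj; cases hj

lemma sumNb_append {w ext : List Bool} {nb : List Int}
    (h : ∀ j ∈ nb, 0 ≤ j ∧ j.toNat < w.length) :
    sumNb (w ++ ext) nb = sumNb w nb := by
  simp only [sumNb]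
  apply PySem.List.foldl_congr_mem
  intro acc j hj
  obtain ⟨h0, hlt⟩ := h j hj
  have hcast : j = ((j.toNat : Nat) : Int) := by omega
  rw [hcast, PySem.List.pyGet?_natCast, PySem.List.pyGet?_natCast]
  rw [List.getElem?_append_left hlt]

def offs8 : List (Int × Int) := [(-1,-1),(-1,0),(-1,1),(0,-1),(0,1),(1,-1),(1,0),(1,1)]

lemma getNeighbors_eq (gd : List (List String)) (row col : Int) :
    getNeighbors gd row col =
      (offs8.filter (fun d => decide (0 ≤ row + d.1 ∧ row + d.1 < (gd.length : Int) ∧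
          0 ≤ col + d.2 ∧ col + d.2 < (colsOf gd : Int)))).map
        (fun d => (row + d.1, col + d.2)) := by
  simp only [getNeighbors, offs8, colsOf]
  rw [PySem.List.foldl_append_ite
    (p := fun d : Int × Int => 0 ≤ row + d.1 ∧ row + d.1 < (gd.length : Int) ∧
      0 ≤ col + d.2 ∧ col + d.2 < ((gd.headD []).length : Int))
    (f := fun d : Int × Int => (row + d.1, col + d.2))]
  rfl

lemma nbOf_eq_offs (gd : List (List String)) (r c : Nat) :
    nbOf gd r c = offs8.filterMap (fun d => (indexOf gd).get? ((r : Int) + d.1, (c : Int) + d.2)) := by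
  simp only [nbOf, offs8]
  norm_num [List.flatMap_cons, List.filterMap_cons]
  cases (indexOf gd).get? (↑r + -1, ↑c + -1) <;>
    cases (indexOf gd).get? (↑r + -1, ↑c) <;>
    cases (indexOf gd).get? (↑r + -1, ↑c + 1) <;>
    cases (indexOf gd).get? (↑r, ↑c + -1) <;>
    cases (indexOf gd).get? (↑r, ↑c + 1) <;>
    cases (indexOf gd).get? (↑r + 1, ↑c + -1) <;>
    cases (indexOf gd).get? (↑r + 1, ↑c) <;>
    cases (indexOf gd).get? (↑r + 1, ↑c + 1) <;>
    rfl

lemma sum_map_filterMap {α : Type} (l : List α) (h : α → Option Int) (g : Int → Int) :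
    (((l.filterMap h).map g).sum) = (l.map (fun d => ((h d).map g).getD 0)).sum := by
  induction l with
  | nil => rfl
  | cons x t ih =>
    simp only [List.filterMap_cons, List.map_cons, List.sum_cons]
    cases hx : h x with
    | none => simpa using ih
    | some j => simp [ih]

/-- A's trap count at a numeric cell over a fully assigned board equals B's
neighbour-index sum. -/
lemma count_eq_sumNb {gd : List (List String)} {v : List Bool} {r c : Nat}
    (hS : Shaped gd) (hr : r < gd.length) (hc : c < colsOf gd)
    (hv : v.length = (blanksOf gd).length) :
    ((getNeighbors gd r c).foldl
      (fun a p => if isTrap (cellGet (Wb gd (fAssign gd v)) p.1.toNat p.2.toNat)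
                  then a + 1 else a) (0 : Int)) = sumNb v (nbOf gd r c) := by
  rw [getNeighbors_eq, PySem.List.foldl_ite_add_one, List.countP_map, List.countP_filter]
  rw [sumNb, PySem.List.foldl_add, nbOf_eq_offs, sum_map_filterMap]
  rw [zero_add, zero_add, ← PySem.List.sum_map_ite_one_zero]
  apply congrArg
  apply List.map_congr_left
  intro d _
  rw [indexOf_get?]
  set x : Int := (r : Int) + d.1 with hx
  set y : Int := (c : Int) + d.2 with hy
  by_cases hcond : (0 ≤ x ∧ 0 ≤ y ∧ (x.toNat, y.toNat) ∈ blanksOf gd)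
  · rw [dif_pos hcond]
    obtain ⟨h1, h2, h3⟩ := hcond
    obtain ⟨hb1, hb2, hb3⟩ := mem_blanksOf.mp h3
    obtain ⟨hlt, _⟩ := blanksOf_getElem_posIdx h3
    have hrow : gd.getD x.toNat [] = gd[x.toNat] := List.getD_eq_getElem _ _ hb1
    have hclen : y.toNat < (gd.getD x.toNat []).length := by
      rw [hrow]
      have := hS gd[x.toNat] (List.getElem_mem hb1)
      omega
    have hcell : cellGet (Wb gd (fAssign gd v)) x.toNat y.toNat =
        Cell.b (v.getD (posIdx gd (x.toNat, y.toNat)) false) := by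
      rw [cellGet_Wb hb1 hclen, if_pos ⟨hb2, hb3⟩]
      rfl
    have hrange : (0 ≤ x ∧ x < (gd.length : Int) ∧ 0 ≤ y ∧ y < (colsOf gd : Int)) := by omega
    simp only [hrange, Function.comp]
    simp only [← hx, ← hy]
    rw [hcell]
    simp only [isTrap, Option.map_some, Option.getD_some]
    rw [PySem.List.pyGet?_natCast,
      List.getElem?_eq_getElem (by omega : posIdx gd (x.toNat, y.toNat) < v.length)]
    rw [List.getD_eq_getElem _ _ (by omega : posIdx gd (x.toNat, y.toNat) < v.length)]
    simp
  · rw [dif_neg hcond]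
    simp only [Option.map_none, Option.getD_none]
    by_cases hin : (0 ≤ x ∧ x < (gd.length : Int) ∧ 0 ≤ y ∧ y < (colsOf gd : Int))
    · have hxr : x.toNat < gd.length := by omega
      have hnotblank : ¬ (strGet gd x.toNat y.toNat = "_") := by
        intro hb
        exact hcond ⟨hin.1, hin.2.2.1, mem_blanksOf.mpr ⟨hxr, by omega, hb⟩⟩
      have hrow : gd.getD x.toNat [] = gd[x.toNat] := List.getD_eq_getElem _ _ hxr
      have hclen : y.toNat < (gd.getD x.toNat []).length := by
        rw [hrow]
        have := hS gd[x.toNat] (List.getElem_mem hxr)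
        omega
      have hcell : cellGet (Wb gd (fAssign gd v)) x.toNat y.toNat =
          Cell.s (strGet gd x.toNat y.toNat) :=  by
        rw [cellGet_Wb hxr hclen, if_neg (by intro hk; exact hnotblank hk.2)]
      simp only [Function.comp]
      simp only [← hx, ← hy]
      rw [hcell]
      simp [isTrap]
    · simp [hin]

lemma isValidA_iff {gd : List (List String)} {v : List Bool}
    (hS : Shaped gd) (hv : v.length = (blanksOf gd).length) :
    isValidA gd (Wb gd (fAssign gd v)) = true ↔
      ∀ r < gd.length, ∀ c < colsOf gd, numericP gd r c →
        sumNb v (nbOf gd r c) = targetOf gd r c := by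
  simp only [isValidA, List.all_eq_true, List.mem_range]
  rw [show (gd.headD []).length = colsOf gd from rfl]
  constructor
  · intro h r hr c hc hnum
    have h2 := h r hr c hc
    rw [if_pos hnum, beq_iff_eq] at h2
    rw [← count_eq_sumNb hS hr hc hv]
    exact h2
  · intro h r hr c hc
    by_cases hnum : numericP gd r c
    · rw [if_pos hnum, beq_iff_eq, count_eq_sumNb hS hr hc hv]
      exact h r hr c hc hnum
    · rw [if_neg hnum]

-- ===== refSearch facts =====

lemma refSearch_some_length {gd m vals v} (h : refSearch gd m vals = some v) :
    v.length = vals.length + m := by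
  induction m generalizing vals v with
  | zero =>
    simp only [refSearch] at h
    split at h
    · cases h; omega
    · cases h
  | succ m ih =>
    simp only [refSearch] at h
    cases h1 : refSearch gd m (vals ++ [true]) with
    | some w =>
      rw [h1] at h
      cases h
      have := ih h1
      simp at this
      omega
    | none =>
      rw [h1] at h
      have := ih h
      simp at this
      omega

lemma refSearch_none {gd m vals}
    (h : ∀ w, vals <+: w → w.length = vals.length + m →
          isValidA gd (Wb gd (fAssign gd w)) = false) :
    refSearch gd m vals = none := by
  induction m generalizing vals with
  | zero =>
    simp only [refSearch]
    rw [if_neg]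
    simp [h vals List.prefix_rfl rfl]
  | succ m ih =>
    simp only [refSearch]
    have hb : ∀ b : Bool, refSearch gd m (vals ++ [b]) = none := by
      intro b
      apply ih
      intro w hpre hlen
      apply h w (List.IsPrefix.trans (List.prefix_append _ _) hpre)
      simp at hlen
      omega
    rw [hb true, hb false]

-- ===== main lemma, A side =====

lemma idx_lt {R C r c : Nat} (hr : r < R) (hc : c ≤ C) : r * (C+1) + c < R * (C+1) := by
  have h2 : r * (C+1) + (C+1) = (r+1) * (C+1) := by ring
  have h3 : (r+1) * (C+1) ≤ R * (C+1) := Nat.mul_le_mul_right _ hr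
  omega

lemma backtrackA_spec (gd : List (List String)) (hne : gd ≠ []) (hS : Shaped gd) :
    ∀ fuel r c (f : Nat × Nat → Cell),
    r < gd.length → c ≤ colsOf gd →
    (∀ p, blankP gd p → pltP p (r, c) → ∃ v, f p = Cell.b v) →
    (∀ p, blankP gd p → ¬ pltP p (r, c) → isBoolOrBlank (f p) = true) →
    (gd.length * (colsOf gd + 1) - (r * (colsOf gd + 1) + c) ≤ fuel) →
    backtrackA gd fuel (Wb gd f) r c =
      match refSearch gd (blanksFrom gd r c).length
              ((blanksBefore gd r c).map (fun p => isTrap (f p))) with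
      | some v => (true, Wb gd (fAssign gd v))
      | none => (false, Wb gd (fun p => if pltP p (r, c) then f p else Cell.b false)) := by
  intro fuel
  induction fuel with
  | zero =>
    intro r c f hr hc _ _ hfuel
    exact absurd hfuel (by have := idx_lt (R := gd.length) (C := colsOf gd) hr hc; omega)
  | succ fuel ih =>
    intro r c f hr hc hpre hsuf hfuel
    show (let rows := gd.length
          let cols := (gd.headD []).length
          if r = rows - 1 ∧ c = cols then (isValidA gd (Wb gd f), Wb gd f)
          else if c = cols then backtrackA gd fuel (Wb gd f) (r+1) 0
          else
            let bd1 := if isBoolOrBlank (cellGet (Wb gd f) r c) then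
                cellSet (Wb gd f) r c (.b true) else Wb gd f
            match backtrackA gd fuel bd1 r (c+1) with
            | (true, bd') => (true, bd')
            | (false, bd') =>
              let bd2 := if isBoolOrBlank (cellGet bd' r c) then cellSet bd' r c (.b false)
                         else bd'
              backtrackA gd fuel bd2 r (c+1)) = _
    rw [show (gd.headD []).length = colsOf gd from rfl]
    simp only []
    by_cases hbase : r = gd.length - 1 ∧ c = colsOf gd
    · rw [if_pos hbase]
      obtain ⟨hb1, hb2⟩ := hbase
      subst hb1; subst hb2
      rw [blanksFrom_last, blanksBefore_last hne]
      have hall : ∀ p, blankP gd p → pltP p (gd.length - 1, colsOf gd) := by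
        intro p hp
        rcases hp with ⟨h1, h2, _⟩
        simp only [pltP]
        omega
      have hWb : Wb gd (fAssign gd ((blanksOf gd).map (fun p => isTrap (f p)))) = Wb gd f :=
        fAssign_read f (fun p hp => hpre p hp (hall p hp))
      simp only [List.length_nil, refSearch, hWb]
      cases hV : isValidA gd (Wb gd f) with
      | true => simp [hWb]
      | false =>
        rw [if_neg (by simp)]
        simp only []
        refine congrArg _ (Wb_congr ?_)
        intro p hp
        rw [if_pos (hall p hp)]
    · rw [if_neg hbase]
      by_cases hcol : c = colsOf gd
      · rw [if_pos hcol]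
        subst hcol
        have hr2 : r + 1 < gd.length := by
          rcases Nat.lt_or_ge (r+1) gd.length with h | h
          · exact h
          · exact absurd ⟨by omega, rfl⟩ hbase
        have heq : ∀ p, blankP gd p → (pltP p (r+1, 0) ↔ pltP p (r, colsOf gd)) := by
          intro p hp
          rcases hp with ⟨_, h2, _⟩
          simp only [pltP]
          omega
        have h1 := ih (r+1) 0 f hr2 (Nat.zero_le _)
          (fun p hp hlt => hpre p hp ((heq p hp).mp hlt))
          (fun p hp hlt => hsuf p hp (fun hx => hlt ((heq p hp).mpr hx)))
          (by have e : (r+1) * (colsOf gd + 1) = r * (colsOf gd + 1) + (colsOf gd + 1) := by ring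
              omega)
        rw [h1, blanksFrom_step_row hr2, blanksBefore_step_row]
        cases h2 : refSearch gd (blanksFrom gd (r+1) 0).length
            ((blanksBefore gd (r+1) 0).map (fun p => isTrap (f p))) with
        | some v => rw [blanksBefore_step_row] at h2; rw [h2]
        | none =>
          rw [blanksBefore_step_row] at h2
          rw [h2]
          simp only []
          refine congrArg _ (Wb_congr ?_)
          intro p hp
          by_cases hx : pltP p (r+1, 0)
          · rw [if_pos hx, if_pos ((heq p hp).mp hx)]
          · rw [if_neg hx, if_neg (fun hy => hx ((heq p hp).mpr hy))]
      · have hclt : c < colsOf gd := lt_of_le_of_ne hc hcol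
        rw [if_neg hcol]
        have hrowmem : gd.getD r [] ∈ gd := by
          rw [List.getD_eq_getElem _ _ hr]
          exact List.getElem_mem hr
        have hrowlen : c < (gd.getD r []).length := by
          have := hS _ hrowmem
          omega
        have hfuel2 : gd.length * (colsOf gd + 1) - (r * (colsOf gd + 1) + (c+1)) ≤ fuel := by
          omega
        rw [cellGet_Wb hr hrowlen]
        by_cases hblank : strGet gd r c = "_"
        · have hcellif : (if c < colsOf gd ∧ strGet gd r c = "_" then f (r, c)
              else Cell.s (strGet gd r c)) = f (r, c) := if_pos ⟨hclt, hblank⟩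
          rw [hcellif]
          have hpblank : blankP gd (r, c) := ⟨hr, hclt, hblank⟩
          have hbb : isBoolOrBlank (f (r, c)) = true :=
            hsuf (r, c) hpblank (by simp [pltP])
          rw [if_pos hbb, cellSet_Wb hpblank]
          -- step facts
          have hmemB : ∀ p, p ∈ blanksBefore gd r c → blankP gd p ∧ pltP p (r, c) :=
            fun p hp => (mem_blanksBefore hr hc).mp hp
          have hnotc : ∀ p, pltP p (r, c) → p ≠ (r, c) := by
            rintro p hlt rfl
            simp [pltP] at hlt
          have hplt_iff : ∀ p, blankP gd p → p ≠ (r, c) →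
              (pltP p (r, (c+1)) ↔ pltP p (r, c)) := by
            intro p hp hne'
            rcases hp with ⟨_, _, _⟩
            simp only [pltP]
            constructor
            · rintro (h | ⟨h1, h2⟩)
              · exact Or.inl h
              · rcases Nat.lt_or_ge p.2 c with h3 | h3
                · exact Or.inr ⟨h1, h3⟩
                · exact absurd (Prod.ext_iff.mpr ⟨h1, by omega⟩) hne'
            · rintro (h | ⟨h1, h2⟩)
              · exact Or.inl h
              · exact Or.inr ⟨h1, by omega⟩
          -- first recursive call, cell set to true
          have hpre1 : ∀ p, blankP gd p → pltP p (r, c+1) →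
              ∃ v, (fun q => if q = (r, c) then Cell.b true else f q) p = Cell.b v := by
            intro p hp hlt
            beta_reduce
            by_cases hpc : p = (r, c)
            · exact ⟨true, by rw [if_pos hpc]⟩
            · exact (hpre p hp ((hplt_iff p hp hpc).mp hlt)).imp
                (fun v hv => by rw [if_neg hpc]; exact hv)
          have hsuf1 : ∀ p, blankP gd p → ¬ pltP p (r, c+1) →
              isBoolOrBlank ((fun q => if q = (r, c) then Cell.b true else f q) p) = true := by
            intro p hp hlt
            beta_reduce
            by_cases hpc : p = (r, c)
            · rw [if_pos hpc]; rfl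
            · rw [if_neg hpc]
              exact hsuf p hp (fun hx => hlt ((hplt_iff p hp hpc).mpr hx))
          have h1 := ih r (c+1) _ hr hclt hpre1 hsuf1 hfuel2
          rw [h1]
          have hread1 : (blanksBefore gd r (c+1)).map
              (fun p => isTrap ((fun q => if q = (r, c) then Cell.b true else f q) p)) =
              ((blanksBefore gd r c).map (fun p => isTrap (f p))) ++ [true] := by
            rw [blanksBefore_step_blank hblank, List.map_append]
            refine congrArg₂ _ (List.map_congr_left ?_) (by simp [isTrap])
            intro p hp
            beta_reduce
            rw [if_neg (hnotc p (hmemB p hp).2)]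
          rw [hread1, blanksFrom_step_blank hclt hblank]
          simp only [List.length_cons, refSearch]
          cases h2 : refSearch gd (blanksFrom gd r (c+1)).length
              (((blanksBefore gd r c).map (fun p => isTrap (f p))) ++ [true]) with
          | some v => rfl
          | none =>
            simp only []
            -- the failing board from the first call, then the cell set to false
            rw [cellGet_Wb hr hrowlen]
            have hcell2 : (if c < colsOf gd ∧ strGet gd r c = "_" then
                (fun p' => if pltP p' (r, c+1) then
                    (if p' = (r, c) then Cell.b true else f p') else Cell.b false) (r, c)
                else Cell.s (strGet gd r c)) = Cell.b true := by
              rw [if_pos ⟨hclt, hblank⟩]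
              simp [pltP]
            rw [hcell2, if_pos (show isBoolOrBlank (Cell.b true) = true from rfl),
                cellSet_Wb hpblank]
            have hpre2 : ∀ p, blankP gd p → pltP p (r, c+1) →
                ∃ v, (fun q => if q = (r, c) then Cell.b false else
                      (fun p' => if pltP p' (r, c+1) then
                          (if p' = (r, c) then Cell.b true else f p') else Cell.b false) q) p
                    = Cell.b v := by
              intro p hp hlt
              beta_reduce
              by_cases hpc : p = (r, c)
              · exact ⟨false, by rw [if_pos hpc]⟩
              · rw [if_neg hpc]
                simp only [if_pos hlt, if_neg hpc]
                exact hpre p hp ((hplt_iff p hp hpc).mp hlt)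
            have hsuf2 : ∀ p, blankP gd p → ¬ pltP p (r, c+1) →
                isBoolOrBlank ((fun q => if q = (r, c) then Cell.b false else
                      (fun p' => if pltP p' (r, c+1) then
                          (if p' = (r, c) then Cell.b true else f p') else Cell.b false) q) p)
                    = true := by
              intro p hp hlt
              beta_reduce
              by_cases hpc : p = (r, c)
              · rw [if_pos hpc]; rfl
              · rw [if_neg hpc]
                simp only [if_neg hlt]
                rfl
            have h3 := ih r (c+1) _ hr hclt hpre2 hsuf2 hfuel2
            rw [h3]
            have hread2 : (blanksBefore gd r (c+1)).map
                (fun p => isTrap ((fun q => if q = (r, c) then Cell.b false else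
                      (fun p' => if pltP p' (r, c+1) then
                          (if p' = (r, c) then Cell.b true else f p') else Cell.b false) q) p)) =
                ((blanksBefore gd r c).map (fun p => isTrap (f p))) ++ [false] := by
              rw [blanksBefore_step_blank hblank, List.map_append]
              refine congrArg₂ _ (List.map_congr_left ?_) (by simp [isTrap])
              intro p hp
              beta_reduce
              obtain ⟨hpb, hplt⟩ := hmemB p hp
              rw [if_neg (hnotc p hplt)]
              simp only [if_pos ((hplt_iff p hpb (hnotc p hplt)).mpr hplt),
                if_neg (hnotc p hplt)]
            rw [hread2]
            cases h4 : refSearch gd (blanksFrom gd r (c+1)).length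
                (((blanksBefore gd r c).map (fun p => isTrap (f p))) ++ [false]) with
            | some v => rfl
            | none =>
              simp only []
              refine congrArg _ (Wb_congr ?_)
              intro p hp
              by_cases hpc : p = (r, c)
              · subst hpc
                rw [if_pos (by simp [pltP]), if_pos rfl, if_neg (by simp [pltP])]
              · by_cases hlt : pltP p (r, c+1)
                · rw [if_pos hlt, if_neg hpc]
                  simp only [if_pos hlt, if_neg hpc]
                  rw [if_pos ((hplt_iff p hp hpc).mp hlt)]
                · rw [if_neg hlt, if_neg (fun hx => hlt ((hplt_iff p hp hpc).mpr hx))]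
        · have hcellif : (if c < colsOf gd ∧ strGet gd r c = "_" then f (r, c)
              else Cell.s (strGet gd r c)) = Cell.s (strGet gd r c) :=
            if_neg (fun hk => hblank hk.2)
          rw [hcellif]
          have hbb : isBoolOrBlank (Cell.s (strGet gd r c)) = false := by
            simp [isBoolOrBlank, hblank]
          rw [if_neg (by simp [hbb])]
          have hnotblankp : ¬ blankP gd (r, c) := fun hb => hblank hb.2.2
          have hplt_iff : ∀ p, blankP gd p → (pltP p (r, (c+1)) ↔ pltP p (r, c)) := by
            intro p hp
            have hpc : p ≠ (r, c) := fun hx => hnotblankp (hx ▸ hp)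
            simp only [pltP]
            constructor
            · rintro (h | ⟨h1, h2⟩)
              · exact Or.inl h
              · rcases Nat.lt_or_ge p.2 c with h3 | h3
                · exact Or.inr ⟨h1, h3⟩
                · exact absurd (Prod.ext_iff.mpr ⟨h1, by omega⟩) hpc
            · rintro (h | ⟨h1, h2⟩)
              · exact Or.inl h
              · exact Or.inr ⟨h1, by omega⟩
          have h1 := ih r (c+1) f hr hclt
            (fun p hp hlt => hpre p hp ((hplt_iff p hp).mp hlt))
            (fun p hp hlt => hsuf p hp (fun hx => hlt ((hplt_iff p hp).mpr hx)))
            hfuel2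
          rw [h1, blanksBefore_step_fixed hblank, blanksFrom_step_fixed hclt hblank]
          cases h2 : refSearch gd (blanksFrom gd r (c+1)).length
              ((blanksBefore gd r c).map (fun p => isTrap (f p))) with
          | some v => rfl
          | none =>
            simp only []
            rw [cellGet_Wb hr hrowlen]
            have hcell3 : (if c < colsOf gd ∧ strGet gd r c = "_" then
                (fun p' => if pltP p' (r, c+1) then f p' else Cell.b false) (r, c)
                else Cell.s (strGet gd r c)) = Cell.s (strGet gd r c) :=
              if_neg (fun hk => hblank hk.2)
            rw [hcell3, if_neg (by simp [hbb])]
            have hpre3 : ∀ p, blankP gd p → pltP p (r, c+1) →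
                ∃ v, (fun p' => if pltP p' (r, c+1) then f p' else Cell.b false) p
                    = Cell.b v := by
              intro p hp hlt
              beta_reduce
              simp only [if_pos hlt]
              exact hpre p hp ((hplt_iff p hp).mp hlt)
            have hsuf3 : ∀ p, blankP gd p → ¬ pltP p (r, c+1) →
                isBoolOrBlank ((fun p' => if pltP p' (r, c+1) then f p' else Cell.b false) p)
                    = true := by
              intro p hp hlt
              beta_reduce
              simp only [if_neg hlt]
              rfl
            have h3 := ih r (c+1) _ hr hclt hpre3 hsuf3 hfuel2
            rw [h3]
            have hread3 : (blanksBefore gd r (c+1)).map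
                (fun p => isTrap ((fun p' => if pltP p' (r, c+1) then f p' else Cell.b false) p)) =
                ((blanksBefore gd r c).map (fun p => isTrap (f p))) := by
              rw [blanksBefore_step_fixed hblank]
              refine List.map_congr_left ?_
              intro p hp
              beta_reduce
              obtain ⟨hpb, hplt⟩ := (mem_blanksBefore hr hc).mp hp
              rw [if_pos ((hplt_iff p hpb).mpr hplt)]
            rw [hread3, h2]
            simp only []
            refine congrArg _ (Wb_congr ?_)
            intro p hp
            by_cases hlt : pltP p (r, c+1)
            · simp only [if_pos hlt]
              rw [if_pos ((hplt_iff p hp).mp hlt)]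
            · simp only [if_neg hlt]
              rw [if_neg (fun hx => hlt ((hplt_iff p hp).mpr hx))]

-- ===== main lemma, B side =====

/-- Characterisation of B's constraint-building loop. -/
def allCells (gd : List (List String)) : List (Nat × Nat) :=
  (List.range gd.length).flatMap fun r => (List.range (colsOf gd)).map fun c => (r, c)

def consOf (gd : List (List String)) : List (Int × List Int) :=
  (allCells gd).filterMap fun p =>
    if numericP gd p.1 p.2 ∧ nbOf gd p.1 p.2 ≠ [] then
      some (targetOf gd p.1 p.2, nbOf gd p.1 p.2)
    else none

abbrev badP (gd : List (List String)) : Prop :=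
  ∃ r < gd.length, ∃ c < colsOf gd,
    numericP gd r c ∧ nbOf gd r c = [] ∧ targetOf gd r c ≠ 0

def maxIdx (nb : List Int) : Nat := ((PySem.List.max? nb (fun x => x)).getD 0).toNat

lemma maxIdx_facts {nb : List Int} {N : Nat} (hne : nb ≠ [])
    (hb : ∀ j ∈ nb, 0 ≤ j ∧ j.toNat < N) :
    maxIdx nb < N ∧ ∀ j ∈ nb, j ≤ (maxIdx nb : Int) := by
  cases hm : PySem.List.max? nb (fun x => x) with
  | none => exact absurd ((PySem.List.max?_eq_none_iff _ _).mp hm) hne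
  | some m =>
    have hmem := PySem.List.max?_mem hm
    have hmax := PySem.List.max?_isMax hm
    have hm0 := hb m hmem
    constructor
    · simpa [maxIdx, hm] using hm0.2
    · intro j hj
      have := hmax j hj
      simp only [maxIdx, hm, Option.getD_some]
      omega

def pstep (gd : List (List String)) (acc : Option (List (List (Int × List Int))))
    (p : Nat × Nat) : Option (List (List (Int × List Int))) :=
  match acc with
  | none => none
  | some pend =>
    if PySem.Str.strIsdigit (strGet gd p.1 p.2) then
      let nb := nbOf gd p.1 p.2
      let target : Int := (PySem.Int.ofStr? (strGet gd p.1 p.2)).getD 0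
      if nb ≠ [] then
        some (pend.modify (((PySem.List.max? nb (fun x => x)).getD 0).toNat)
                (fun l => l ++ [(target, nb)]))
      else if target ≠ 0 then none
      else some pend
    else some pend

lemma pstep_some (gd : List (List String)) (B0 : List (List (Int × List Int))) (p : Nat × Nat) :
    pstep gd (some B0) p =
      if numericP gd p.1 p.2 then
        if nbOf gd p.1 p.2 ≠ [] then
          some (B0.modify (maxIdx (nbOf gd p.1 p.2))
                  (fun l => l ++ [(targetOf gd p.1 p.2, nbOf gd p.1 p.2)]))
        else if targetOf gd p.1 p.2 ≠ 0 then none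
        else some B0
      else some B0 := rfl

lemma pendingOf_eq_cells (gd : List (List String)) :
    pendingOf gd = (allCells gd).foldl (pstep gd)
      (some (List.replicate (blanksOf gd).length ([] : List (Int × List Int)))) := by
  simp only [pendingOf, allCells, List.foldl_flatMap, List.foldl_map, pstep, colsOf]

lemma pstep_none (gd : List (List String)) (l : List (Nat × Nat)) :
    l.foldl (pstep gd) none = none := by
  induction l with
  | nil => rfl
  | cons p t ih => exact ih

def consOfList (gd : List (List String)) (l : List (Nat × Nat)) : List (Int × List Int) :=
  l.filterMap fun p =>
    if numericP gd p.1 p.2 ∧ nbOf gd p.1 p.2 ≠ [] then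
      some (targetOf gd p.1 p.2, nbOf gd p.1 p.2)
    else none

lemma pfold (gd : List (List String)) (n : Nat)
    (l : List (Nat × Nat))
    (hl : ∀ p ∈ l, numericP gd p.1 p.2 → nbOf gd p.1 p.2 ≠ [] → maxIdx (nbOf gd p.1 p.2) < n) :
    ∀ B0 : List (List (Int × List Int)), B0.length = n →
    l.foldl (pstep gd) (some B0) =
      if ∃ p ∈ l, numericP gd p.1 p.2 ∧ nbOf gd p.1 p.2 = [] ∧ targetOf gd p.1 p.2 ≠ 0 then none
      else some ((List.range n).map
        (fun i => B0.getD i [] ++ (consOfList gd l).filter (fun con => maxIdx con.2 = i))) := by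
  induction l with
  | nil =>
    intro B0 hB0
    rw [List.foldl_nil, if_neg (by simp)]
    refine congrArg _ ?_
    apply List.ext_getElem
    · simp [hB0]
    intro i h1 h2
    simp only [List.getElem_map, List.getElem_range, consOfList, List.filterMap_nil,
      List.filter_nil, List.append_nil]
    rw [List.getD_eq_getElem _ _ (by simp at h2; omega)]
  | cons p t ih =>
    intro B0 hB0
    simp only [List.foldl_cons]
    by_cases hnum : numericP gd p.1 p.2
    · by_cases hnb : nbOf gd p.1 p.2 ≠ []
      · have hstep : pstep gd (some B0) p =
            some (B0.modify (maxIdx (nbOf gd p.1 p.2))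
              (fun l => l ++ [(targetOf gd p.1 p.2, nbOf gd p.1 p.2)])) := by
          rw [pstep_some, if_pos hnum, if_pos hnb]
        rw [hstep]
        have hmax : maxIdx (nbOf gd p.1 p.2) < n :=
          hl p List.mem_cons_self hnum hnb
        rw [ih (fun q hq => hl q (List.mem_cons_of_mem _ hq)) _ (by simp [List.length_modify, hB0])]
        have hcons : consOfList gd (p :: t) =
            (targetOf gd p.1 p.2, nbOf gd p.1 p.2) :: consOfList gd t := by
          simp only [consOfList, List.filterMap_cons]
          rw [if_pos ⟨hnum, hnb⟩]
        by_cases hbad : ∃ q ∈ t, numericP gd q.1 q.2 ∧ nbOf gd q.1 q.2 = [] ∧ targetOf gd q.1 q.2 ≠ 0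
        · rw [if_pos hbad, if_pos (by
            obtain ⟨q, hq, hfacts⟩ := hbad
            exact ⟨q, List.mem_cons_of_mem _ hq, hfacts⟩)]
        · rw [if_neg hbad, if_neg (by
            rintro ⟨q, hq, hq1, hq2, hq3⟩
            rcases List.mem_cons.mp hq with rfl | hq'
            · exact hnb hq2
            · exact hbad ⟨q, hq', hq1, hq2, hq3⟩)]
          refine congrArg _ ?_
          apply List.map_congr_left
          intro i hi
          rw [List.mem_range] at hi
          rw [hcons, List.filter_cons]
          by_cases hit : maxIdx (nbOf gd p.1 p.2) = i
          · rw [if_pos (by simpa using hit)]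
            subst hit
            rw [List.getD_eq_getElem _ _ (by rw [List.length_modify]; omega),
                List.getElem_modify_eq,
                List.getD_eq_getElem _ _ (by omega)]
            simp
          · rw [if_neg (by simpa using hit)]
            rw [List.getD_eq_getElem _ _ (by rw [List.length_modify]; omega),
                List.getElem_modify_ne _ _ hit,
                List.getD_eq_getElem _ _ (by omega)]
      · push Not at hnb
        by_cases ht : targetOf gd p.1 p.2 ≠ 0
        · have hstep : pstep gd (some B0) p = none := by
            rw [pstep_some, if_pos hnum, if_neg (by simp [hnb]), if_pos ht]
          rw [hstep, pstep_none]
          rw [if_pos ⟨p, List.mem_cons_self, hnum, hnb, ht⟩]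
        · push Not at ht
          have hstep : pstep gd (some B0) p = some B0 := by
            rw [pstep_some, if_pos hnum, if_neg (by simp [hnb]), if_neg (by simp [ht])]
          rw [hstep, ih (fun q hq => hl q (List.mem_cons_of_mem _ hq)) _ hB0]
          have hcons : consOfList gd (p :: t) = consOfList gd t := by
            simp only [consOfList, List.filterMap_cons]
            rw [if_neg (fun hk => hk.2 hnb)]
          rw [hcons]
          by_cases hbad : ∃ q ∈ t, numericP gd q.1 q.2 ∧ nbOf gd q.1 q.2 = [] ∧ targetOf gd q.1 q.2 ≠ 0
          · rw [if_pos hbad, if_pos (by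
              obtain ⟨q, hq, hfacts⟩ := hbad
              exact ⟨q, List.mem_cons_of_mem _ hq, hfacts⟩)]
          · rw [if_neg hbad, if_neg (by
              rintro ⟨q, hq, hq1, hq2, hq3⟩
              rcases List.mem_cons.mp hq with rfl | hq'
              · exact hq3 ht
              · exact hbad ⟨q, hq', hq1, hq2, hq3⟩)]
    · have hstep : pstep gd (some B0) p = some B0 := by
        rw [pstep_some, if_neg hnum]
      rw [hstep, ih (fun q hq => hl q (List.mem_cons_of_mem _ hq)) _ hB0]
      have hcons : consOfList gd (p :: t) = consOfList gd t := by
        simp only [consOfList, List.filterMap_cons]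
        rw [if_neg (fun hk => hnum hk.1)]
      rw [hcons]
      by_cases hbad : ∃ q ∈ t, numericP gd q.1 q.2 ∧ nbOf gd q.1 q.2 = [] ∧ targetOf gd q.1 q.2 ≠ 0
      · rw [if_pos hbad, if_pos (by
          obtain ⟨q, hq, hfacts⟩ := hbad
          exact ⟨q, List.mem_cons_of_mem _ hq, hfacts⟩)]
      · rw [if_neg hbad, if_neg (by
          rintro ⟨q, hq, hq1, hq2, hq3⟩
          rcases List.mem_cons.mp hq with rfl | hq'
          · exact hnum hq1
          · exact hbad ⟨q, hq', hq1, hq2, hq3⟩)]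

lemma mem_allCells {gd p} : p ∈ allCells gd ↔ p.1 < gd.length ∧ p.2 < colsOf gd := by
  simp only [allCells, List.mem_flatMap, List.mem_range, List.mem_map]
  constructor
  · rintro ⟨r, hr, c, hc, rfl⟩
    exact ⟨hr, hc⟩
  · rintro ⟨h1, h2⟩
    exact ⟨p.1, h1, p.2, h2, rfl⟩

lemma pendingOf_eq (gd : List (List String)) :
    pendingOf gd =
      if badP gd then none
      else some ((List.range (blanksOf gd).length).map
                   (fun i => (consOf gd).filter (fun con => maxIdx con.2 = i))) := by
  rw [pendingOf_eq_cells]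
  rw [pfold gd (blanksOf gd).length (allCells gd)
    (by
      intro p _ _ hnb
      exact (maxIdx_facts hnb (fun j hj => ⟨(nbOf_bounds hj).1, (nbOf_bounds hj).2.1⟩)).1)
    _ (List.length_replicate ..)]
  have hiff : (∃ p ∈ allCells gd, numericP gd p.1 p.2 ∧ nbOf gd p.1 p.2 = [] ∧
      targetOf gd p.1 p.2 ≠ 0) ↔ badP gd := by
    constructor
    · rintro ⟨p, hp, h1, h2, h3⟩
      obtain ⟨ha, hb⟩ := mem_allCells.mp hp
      exact ⟨p.1, ha, p.2, hb, h1, h2, h3⟩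
    · rintro ⟨r, hr, c, hc, h1, h2, h3⟩
      exact ⟨(r, c), mem_allCells.mpr ⟨hr, hc⟩, h1, h2, h3⟩
  by_cases hbad : badP gd
  · rw [if_pos (hiff.mpr hbad), if_pos hbad]
  · rw [if_neg (fun h => hbad (hiff.mp h)), if_neg hbad]
    refine congrArg _ (List.map_congr_left ?_)
    intro i hi
    rw [List.mem_range] at hi
    have hrep : (List.replicate (blanksOf gd).length ([] : List (Int × List Int))).getD i []
        = [] := by simp
    rw [hrep, List.nil_append]
    rfl

lemma mem_consOf_facts {gd con} (h : con ∈ consOf gd) :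
    con.2 ≠ [] ∧ (∀ j ∈ con.2, 0 ≤ j ∧ j ≤ (maxIdx con.2 : Int) ∧ j.toNat < (blanksOf gd).length) ∧
    maxIdx con.2 < (blanksOf gd).length ∧
    ∃ r < gd.length, ∃ c < colsOf gd, numericP gd r c ∧ con = (targetOf gd r c, nbOf gd r c) := by
  simp only [consOf, List.mem_filterMap] at h
  obtain ⟨p, hp, hcon⟩ := h
  by_cases hcond : numericP gd p.1 p.2 ∧ nbOf gd p.1 p.2 ≠ []
  · rw [if_pos hcond] at hcon
    cases hcon
    obtain ⟨ha, hb⟩ := mem_allCells.mp hp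
    have hbnds : ∀ j ∈ nbOf gd p.1 p.2, 0 ≤ j ∧ j.toNat < (blanksOf gd).length :=
      fun j hj => ⟨(nbOf_bounds hj).1, (nbOf_bounds hj).2.1⟩
    obtain ⟨hmax, hle⟩ := maxIdx_facts hcond.2 hbnds
    exact ⟨hcond.2, fun j hj => ⟨(hbnds j hj).1, hle j hj, (hbnds j hj).2⟩, hmax,
      p.1, ha, p.2, hb, hcond.1, rfl⟩
  · rw [if_neg hcond] at hcon
    cases hcon

lemma consOf_complete {gd r c} (hr : r < gd.length) (hc : c < colsOf gd)
    (hn : numericP gd r c) (hnb : nbOf gd r c ≠ []) :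
    (targetOf gd r c, nbOf gd r c) ∈ consOf gd := by
  simp only [consOf, List.mem_filterMap]
  exact ⟨(r, c), mem_allCells.mpr ⟨hr, hc⟩, by rw [if_pos ⟨hn, hnb⟩]⟩

lemma sumNb_def (w : List Bool) (nb : List Int) :
    nb.foldl (fun a j =>
      a + (if (PySem.List.pyGet? w j).getD false then (1 : Int) else 0)) 0 = sumNb w nb := rfl

lemma searchB_eq_refSearch (gd : List (List String)) (hS : Shaped gd)
    (hbad : ¬ badP gd) :
    ∀ k vals, k ≤ (blanksOf gd).length → vals.length = k →
    (∀ i < k, ∀ con ∈ consOf gd, maxIdx con.2 = i → sumNb vals con.2 = con.1) →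
    searchB (((List.range (blanksOf gd).length).map
      (fun i => (consOf gd).filter (fun con => maxIdx con.2 = i))).drop k) vals =
      refSearch gd ((blanksOf gd).length - k) vals := by
  intro k
  set n := (blanksOf gd).length with hn
  have hgen : ∀ d k vals, d = n - k → k ≤ n → vals.length = k →
      (∀ i < k, ∀ con ∈ consOf gd, maxIdx con.2 = i → sumNb vals con.2 = con.1) →
      searchB (((List.range n).map
        (fun i => (consOf gd).filter (fun con => maxIdx con.2 = i))).drop k) vals =
        refSearch gd (n - k) vals := by
    intro d
    induction d with
    | zero =>
      intro k vals hd hk hlen hOK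
      have hkn : k = n := by omega
      subst hkn
      rw [List.drop_of_length_le (by simp)]
      rw [Nat.sub_self]
      simp only [searchB, refSearch]
      rw [if_pos ?hvalid]
      case hvalid =>
        rw [isValidA_iff hS (by omega)]
        intro r hr c hc hnum
        by_cases hnb : nbOf gd r c = []
        · have ht : targetOf gd r c = 0 := by
            by_contra ht
            exact hbad ⟨r, hr, c, hc, hnum, hnb, ht⟩
          rw [hnb, ht]
          rfl
        · have hcon := consOf_complete hr hc hnum hnb
          exact hOK (maxIdx (nbOf gd r c)) ((mem_consOf_facts hcon).2.2.1) _ hcon rfl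
    | succ d ihd =>
      intro k vals hd hk hlen hOK
      have hkn : k < n := by omega
      have hdrop : ((List.range n).map
          (fun i => (consOf gd).filter (fun con => maxIdx con.2 = i))).drop k =
          ((consOf gd).filter (fun con => maxIdx con.2 = k)) ::
          ((List.range n).map
            (fun i => (consOf gd).filter (fun con => maxIdx con.2 = i))).drop (k+1) := by
        rw [List.drop_eq_getElem_cons (by simpa using hkn)]
        simp
      rw [hdrop]
      simp only [searchB, sumNb_def]
      have hstep : ∀ b : Bool,
          (if ((consOf gd).filter (fun con => maxIdx con.2 = k)).all
              (fun con => sumNb (vals ++ [b]) con.2 == con.1) = true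
           then searchB (((List.range n).map
              (fun i => (consOf gd).filter (fun con => maxIdx con.2 = i))).drop (k+1))
              (vals ++ [b])
           else none) = refSearch gd (n - (k+1)) (vals ++ [b]) := by
        intro b
        by_cases hchk : ((consOf gd).filter (fun con => maxIdx con.2 = k)).all
            (fun con => sumNb (vals ++ [b]) con.2 == con.1) = true
        · rw [if_pos hchk]
          apply ihd (k+1) (vals ++ [b]) (by omega) (by omega) (by simp [hlen])
          intro i hi con hcon hmax
          by_cases hik : i = k
          · subst hik
            have := List.all_eq_true.mp hchk con (List.mem_filter.mpr ⟨hcon, by simp [hmax]⟩)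
            exact beq_iff_eq.mp this
          · have hik' : i < k := by omega
            have hprev := hOK i hik' con hcon hmax
            rw [← hprev]
            apply sumNb_append
            intro j hj
            have := (mem_consOf_facts hcon).2.1 j hj
            omega
        · rw [if_neg hchk]
          symm
          apply refSearch_none
          intro w hpre hwlen
          obtain ⟨ext, rfl⟩ := hpre
          have hwl : ((vals ++ [b]) ++ ext).length = n := by
            simp at hwlen ⊢
            omega
          rw [List.all_eq_true] at hchk
          push Not at hchk
          obtain ⟨con, hconf, hneq⟩ := hchk
          obtain ⟨hcon, hmax⟩ := List.mem_filter.mp hconf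
          have hmax' : maxIdx con.2 = k := by simpa using hmax
          cases hV : isValidA gd (Wb gd (fAssign gd ((vals ++ [b]) ++ ext))) with
          | false => rfl
          | true =>
            exfalso
            obtain ⟨_, hbnds, _, r, hr, c, hc, hnum, hconeq⟩ := mem_consOf_facts hcon
            have hval := (isValidA_iff hS (by omega)).mp hV r hr c hc hnum
            have hsum : sumNb ((vals ++ [b]) ++ ext) con.2 = sumNb (vals ++ [b]) con.2 := by
              apply sumNb_append
              intro j hj
              have := hbnds j hj
              have hjk : j ≤ (k : Int) := by omega
              simp only [List.length_append, List.length_cons, List.length_nil, hlen]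
              omega
            apply hneq
            rw [hconeq] at hsum ⊢
            show (sumNb (vals ++ [b]) (nbOf gd r c) == targetOf gd r c) = true
            rw [beq_iff_eq]
            have hsum2 : sumNb ((vals ++ [b]) ++ ext) (nbOf gd r c) =
                sumNb (vals ++ [b]) (nbOf gd r c) := hsum
            rw [← hsum2]
            exact hval
      rw [show n - k = (n - (k+1)) + 1 by omega]
      simp only [refSearch]
      rw [← hstep true, ← hstep false]
      rfl
  intro vals hk hlen hOK
  exact hgen (n - k) k vals rfl hk hlen hOK

-- ===== rendering =====

def tgv (gd : List (List String)) (v : List Bool) (p : Nat × Nat) : String :=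
  if v.getD (posIdx gd p) false then "T" else "G"

lemma strGet_strSet_ne (g : List (List String)) {a b x y : Nat} (s : String)
    (h : ¬(x = a ∧ y = b)) : strGet (strSet g a b s) x y = strGet g x y := by
  simp only [strGet, strSet, List.getD_eq_getElem?_getD]
  by_cases hxa : x = a
  · subst hxa
    have hyb : y ≠ b := fun hy => h ⟨rfl, hy⟩
    rw [List.getElem?_set]
    by_cases hxl : x < g.length
    · rw [if_pos rfl, if_pos hxl]
      simp only [Option.getD_some]
      rw [List.getElem?_set_ne (fun hc => hyb hc.symm)]
    · rw [if_pos rfl, if_neg hxl]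
      have hnone : g[x]? = none := List.getElem?_eq_none (by omega)
      rw [hnone]
  · rw [List.getElem?_set_ne (fun hc => hxa hc.symm)]

lemma renderA_swap (gd : List (List String)) (tg : Nat × Nat → String) :
    ∀ (cells : List (Nat × Nat)) (g : List (List String)),
    cells.Nodup →
    (∀ p ∈ cells, strGet g p.1 p.2 = strGet gd p.1 p.2) →
    cells.foldl (fun g p => if strGet g p.1 p.2 = "_" then strSet g p.1 p.2 (tg p) else g) g =
    cells.foldl (fun g p => if strGet gd p.1 p.2 = "_" then strSet g p.1 p.2 (tg p) else g) g := by
  intro cells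
  induction cells with
  | nil => intro g _ _; rfl
  | cons p t ih =>
    intro g hnd hag
    simp only [List.foldl_cons]
    rw [hag p List.mem_cons_self]
    by_cases hb : strGet gd p.1 p.2 = "_"
    · rw [if_pos hb]
      apply ih _ (List.Nodup.of_cons hnd)
      intro q hq
      have hqp : q ≠ p := by
        rintro rfl
        exact (List.nodup_cons.mp hnd).1 hq
      rw [strGet_strSet_ne g _ (by
        intro ⟨h1, h2⟩
        exact hqp (Prod.ext_iff.mpr ⟨h1, h2⟩))]
      exact hag q (List.mem_cons_of_mem _ hq)
    · rw [if_neg hb]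
      exact ih _ (List.Nodup.of_cons hnd) (fun q hq => hag q (List.mem_cons_of_mem _ hq))

lemma filterMap_if {α β : Type} (l : List α) (P : α → Prop) [DecidablePred P] (f : α → β) :
    l.filterMap (fun c => if P c then some (f c) else none) =
      (l.filter (fun c => decide (P c))).map f := by
  induction l with
  | nil => rfl
  | cons x t ih =>
    rw [List.filterMap_cons, List.filter_cons]
    by_cases hx : P x
    · rw [if_pos hx, if_pos (by simpa using hx), List.map_cons, ih]
    · rw [if_neg hx, if_neg (by simpa using hx), ih]

lemma allCells_filter_blank (gd : List (List String)) :
    (allCells gd).filter (fun p => decide (strGet gd p.1 p.2 = "_")) = blanksOf gd := by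
  simp only [allCells, blanksOf, List.filter_flatMap]
  rw [show (gd.headD []).length = colsOf gd from rfl]
  apply List.flatMap_congr
  intro r _
  rw [List.filter_map, filterMap_if (List.range (colsOf gd))
    (fun c => strGet gd r c = "_") (fun c => (r, c))]
  congr 1

lemma nodup_allCells (gd : List (List String)) : (allCells gd).Nodup := by
  simp only [allCells]
  rw [List.nodup_flatMap]
  constructor
  · intro r _
    exact (List.nodup_range).map (by intro a b h; cases h; rfl)
  · have : List.Pairwise (· ≠ ·) (List.range gd.length) := List.nodup_range
    apply this.imp
    intro a b hab q hq hq'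
    simp only [List.mem_map, List.mem_range] at hq hq'
    obtain ⟨c1, _, rfl⟩ := hq
    obtain ⟨c2, _, he⟩ := hq'
    exact hab (congrArg Prod.fst he.symm)

lemma renderA_eq (gd : List (List String)) (hS : Shaped gd) (v : List Bool) :
    ((List.range gd.length).foldl (fun g row =>
        (List.range (colsOf gd)).foldl (fun g col =>
          if strGet g row col = "_" then
            strSet g row col
              (if cellGet (Wb gd (fAssign gd v)) row col = .b true then "T" else "G")
          else g) g) gd) =
      (blanksOf gd).foldl (fun g p => strSet g p.1 p.2 (tgv gd v p)) gd := by
  have h0 : ((List.range gd.length).foldl (fun g row =>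
        (List.range (colsOf gd)).foldl (fun g col =>
          if strGet g row col = "_" then
            strSet g row col
              (if cellGet (Wb gd (fAssign gd v)) row col = .b true then "T" else "G")
          else g) g) gd) =
      (allCells gd).foldl (fun g p =>
        if strGet g p.1 p.2 = "_" then
          strSet g p.1 p.2
            (if cellGet (Wb gd (fAssign gd v)) p.1 p.2 = .b true then "T" else "G")
        else g) gd := by
    simp only [allCells, List.foldl_flatMap, List.foldl_map]
  rw [h0, renderA_swap gd _ (allCells gd) gd (nodup_allCells gd) (fun _ _ => rfl)]
  rw [PySem.List.foldl_ite_eq_foldl_filter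
    (p := fun p : Nat × Nat => strGet gd p.1 p.2 = "_")
    (f := fun g p => strSet g p.1 p.2
      (if cellGet (Wb gd (fAssign gd v)) p.1 p.2 = .b true then "T" else "G"))]
  rw [allCells_filter_blank]
  apply PySem.List.foldl_congr_mem
  intro g p hp
  obtain ⟨h1, h2, h3⟩ := mem_blanksOf.mp hp
  have hrowlen : p.2 < (gd.getD p.1 []).length := by
    rw [List.getD_eq_getElem _ _ h1]
    have := hS gd[p.1] (List.getElem_mem h1)
    omega
  have hcell : cellGet (Wb gd (fAssign gd v)) p.1 p.2 =
      Cell.b (v.getD (posIdx gd p) false) := by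
    rw [cellGet_Wb h1 hrowlen, if_pos ⟨h2, h3⟩]
    rfl
  rw [hcell]
  simp only [tgv]
  cases v.getD (posIdx gd p) false <;> simp

lemma renderB_zipfold (tg : Nat × Nat → String) :
    ∀ (ps : List (Nat × Nat)) (w : List Bool) (g : List (List String)),
    ps.length = w.length →
    (∀ i (h1 : i < ps.length) (h2 : i < w.length),
      (if w[i] then "T" else "G") = tg (ps[i]'h1)) →
    (ps.zip w).foldl (fun out pv => strSet out pv.1.1 pv.1.2 (if pv.2 then "T" else "G")) g =
      ps.foldl (fun g p => strSet g p.1 p.2 (tg p)) g := by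
  intro ps
  induction ps with
  | nil => intro w g _ _; rfl
  | cons p t ih =>
    intro w g hlen hpt
    cases w with
    | nil => cases hlen
    | cons b wt =>
      simp only [List.zip_cons_cons, List.foldl_cons]
      rw [show (if b then "T" else "G") = tg p from hpt 0 (by simp) (by simp)]
      exact ih wt _ (by simpa using hlen)
        (fun i hi1 hi2 => hpt (i+1) (by simpa using hi1) (by simpa using hi2))

lemma renderB_eq (gd : List (List String)) (v : List Bool)
    (hv : v.length = (blanksOf gd).length) :
    (((blanksOf gd).zip v).foldl
        (fun out pv => strSet out pv.1.1 pv.1.2 (if pv.2 then "T" else "G"))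
        (gd.map (fun row => row))) =
      (blanksOf gd).foldl (fun g p => strSet g p.1 p.2 (tgv gd v p)) gd := by
  rw [List.map_id' gd]
  apply renderB_zipfold (tgv gd v) (blanksOf gd) v gd hv.symm
  intro i h1 h2
  simp only [tgv]
  have hpi : posIdx gd ((blanksOf gd)[i]'h1) = i := by
    have := posIdx_getElem (gd := gd) h1
    rwa [List.getD_eq_getElem _ _ h1] at this
  rw [hpi, List.getD_eq_getElem _ _ h2]

lemma length_pos_of_ne_nil {gd : List (List String)} (h : gd ≠ []) : 0 < gd.length :=
  List.length_pos_iff.mpr h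

theorem solveBackTrack_spec : Claim_equal_solveBackTrack := by
  intro gd _hdom hpre
  obtain ⟨hne, hS⟩ := hpre
  have hS' : Shaped gd := hS
  show solveBackTrack gd = solveBackTrack_alt gd
  have hR : 0 < gd.length := length_pos_of_ne_nil hne
  set n := (blanksOf gd).length with hn
  -- reduce A's backtracking call
  have hA := backtrackA_spec gd hne hS' (gd.length * (colsOf gd + 1) + 1) 0 0
      (fun _ => Cell.s "_") hR (Nat.zero_le _)
      (by intro p _ hlt; exact absurd hlt (by simp [pltP]))
      (by intro p _ _; rfl)
      (by omega)
  rw [blanksFrom_zero hne, blanksBefore_zero] at hA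
  simp only [List.map_nil] at hA
  have hboard : Wb gd (fun _ => Cell.s "_") = gd.map (fun row => row.map Cell.s) := Wb_zero gd
  rw [hboard] at hA
  simp only [colsOf] at hA
  by_cases hbad : badP gd
  · -- B returns none immediately; A's search finds nothing
    have hnoneA : refSearch gd n [] = none := by
      apply refSearch_none
      intro w _ hw
      obtain ⟨r, hr, c, hc, hnum, hnb, ht⟩ := hbad
      by_contra hvt
      have hvt' : isValidA gd (Wb gd (fAssign gd w)) = true := by
        cases hv : isValidA gd (Wb gd (fAssign gd w)) with
        | true => rfl
        | false => exact absurd hv hvt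
      have := (isValidA_iff hS' (by simpa using hw)).mp hvt' r hr c hc hnum
      rw [hnb] at this
      simp [sumNb] at this
      exact ht this.symm
    rw [hnoneA] at hA
    simp only [solveBackTrack, solveBackTrack_alt, pendingOf_eq gd, if_pos hbad]
    rw [hA]
  · -- B builds the buckets and searches; both reduce to refSearch
    have hsearch := searchB_eq_refSearch gd hS' hbad 0 [] (Nat.zero_le _) rfl
      (by intro i hi; omega)
    simp only [List.drop_zero, Nat.sub_zero] at hsearch
    simp only [solveBackTrack, solveBackTrack_alt, pendingOf_eq gd, if_neg hbad]
    rw [hA, hsearch, ← hn]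
    cases href : refSearch gd n [] with
    | none => rfl
    | some v =>
      have hv : v.length = n := by simpa using refSearch_some_length href
      simp only []
      rw [show (gd.headD []).length = colsOf gd from rfl]
      rw [renderA_eq gd hS' v, renderB_eq gd v hv]
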